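-- pv_equiv track=rewrite | github.com/luizmont5/Exerc-cios-Computabilidade-e-Complexidade-de-algoritmo | 18 questão/exercicio18.py | afd_impar_zeros_e_uns
-- ===== SOURCE A (Python) =====
-- def afd_impar_zeros_e_uns(entrada):
--     estado_atual = ('q0', 'q0')
--
--     for simbolo in entrada:
--         if simbolo == '0':
--             estado_atual = (estado_atual[0] == 'q0' and 'q1' or 'q0', estado_atual[1])
--         elif simbolo == '1':
--             estado_atual = (estado_atual[0], estado_atual[1] == 'q0' and 'q1' or 'q0')
--
--     return estado_atual == ('q1', 'q1')
-- ===== SOURCE B (Python) =====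
-- def afd_impar_zeros_e_uns(entrada):
--     return entrada.count('0') % 2 == 1 and entrada.count('1') % 2 == 1
-- ===== Notes on version B (the rewrite author's own statement) =====
-- stated objective: simpler
-- what changed: Replaces the incremental two-component DFA pass with string-pair states by two str.count totals and a final parity test on each.
import Mathlib
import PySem

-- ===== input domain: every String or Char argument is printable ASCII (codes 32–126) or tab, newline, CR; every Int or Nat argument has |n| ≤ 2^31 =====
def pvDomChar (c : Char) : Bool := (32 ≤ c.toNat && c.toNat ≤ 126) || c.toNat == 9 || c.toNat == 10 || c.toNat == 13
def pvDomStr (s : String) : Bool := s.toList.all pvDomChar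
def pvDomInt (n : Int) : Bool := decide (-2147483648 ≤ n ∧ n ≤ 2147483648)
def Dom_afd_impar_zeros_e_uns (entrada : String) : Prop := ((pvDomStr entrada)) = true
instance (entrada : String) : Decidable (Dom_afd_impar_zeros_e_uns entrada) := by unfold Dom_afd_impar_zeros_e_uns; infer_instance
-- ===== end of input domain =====

-- B replaces A's single incremental DFA pass with string-pair state by two str.count totals
-- and a final parity test on each (objective: simpler).

-- ===== PORT A =====
-- one DFA step; Python's `x == 'q0' and 'q1' or 'q0'` is exactly `if x == 'q0' then 'q1' else 'q0'` ('q1' is truthy)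
def pvStepA (st : String × String) (simbolo : Char) : String × String :=
  if simbolo = '0' then ((if st.1 = "q0" then "q1" else "q0"), st.2)
  else if simbolo = '1' then (st.1, (if st.2 = "q0" then "q1" else "q0"))
  else st

def afd_impar_zeros_e_uns (entrada : String) : Bool :=
  let estado_final := entrada.toList.foldl pvStepA ("q0", "q0")
  estado_final == ("q1", "q1")

-- ===== PORT B =====
def afd_impar_zeros_e_uns_alt (entrada : String) : Bool :=
  (PySem.Str.count entrada "0" % 2 == 1) && (PySem.Str.count entrada "1" % 2 == 1)

-- ===== PRECONDITION & SPEC =====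
def Spec_afd_impar_zeros_e_uns (entrada : String) (out : Bool) : Prop := out = afd_impar_zeros_e_uns_alt entrada
instance (entrada : String) (out : Bool) : Decidable (Spec_afd_impar_zeros_e_uns entrada out) := by unfold Spec_afd_impar_zeros_e_uns; infer_instance

-- ===== CLAIM (what is proved, stated in full; the proofs are below) =====
def Claim_equal_afd_impar_zeros_e_uns : Prop := ∀ (entrada : String), Dom_afd_impar_zeros_e_uns entrada → Spec_afd_impar_zeros_e_uns entrada (afd_impar_zeros_e_uns entrada)

-- ===== LEMMAS AND PROOFS =====

-- PySem.Chars.count with a single-character needle is List.count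
theorem pvCountGo_singleton (c : Char) (fuel : Nat) :
    ∀ (s : List Char) (acc : Nat), s.length ≤ fuel →
      PySem.Chars.count.go [c] fuel s acc = acc + s.count c := by
  induction fuel with
  | zero =>
    intro s acc h
    have : s = [] := List.eq_nil_of_length_eq_zero (Nat.le_zero.mp h)
    subst this
    simp [PySem.Chars.count.go]
  | succ n ih =>
    intro s acc h
    cases s with
    | nil => simp [PySem.Chars.count.go]
    | cons hd t =>
      simp only [List.length_cons, Nat.succ_le_succ_iff] at h
      by_cases hc : hd = c
      · subst hc
        have hp : List.isPrefixOf [hd] (hd :: t) = true := by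
          simp [List.isPrefixOf]
        simp only [PySem.Chars.count.go, hp, if_pos]
        rw [show List.drop (List.length [hd]) (hd :: t) = t by simp]
        rw [ih t (acc + 1) h]
        simp [List.count_cons_self]
        omega
      · have hp : List.isPrefixOf [c] (hd :: t) = false := by
          simp [List.isPrefixOf]
          exact fun h' => (hc h'.symm).elim
        simp only [PySem.Chars.count.go, hp]
        rw [if_neg (by simp)]
        rw [ih t acc h]
        simp [List.count_cons_of_ne hc]

theorem pvCount_singleton (c : Char) (s : List Char) :
    PySem.Chars.count s [c] = s.count c := by
  unfold PySem.Chars.count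
  rw [if_neg (by simp)]
  simpa using pvCountGo_singleton c s.length s 0 (le_refl _)

-- boolean state encoding of A's string-pair state
def pvSt (b : Bool) : String := if b then "q1" else "q0"

theorem pvStep_zero (z u : Bool) : pvStepA (pvSt z, pvSt u) '0' = (pvSt (!z), pvSt u) := by
  cases z <;> simp [pvStepA, pvSt]

theorem pvStep_one (z u : Bool) : pvStepA (pvSt z, pvSt u) '1' = (pvSt z, pvSt (!u)) := by
  cases u <;> simp [pvStepA, pvSt]

theorem pvMod_succ (n : Nat) : ((n + 1) % 2 == 1) = !(n % 2 == 1) := by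
  rcases Nat.mod_two_eq_zero_or_one n with h | h <;> simp [Nat.add_mod, h]

-- the fold invariant: A's state records the parities of the counts seen so far
theorem pvFold_parity (l : List Char) : ∀ (z u : Bool),
    l.foldl pvStepA (pvSt z, pvSt u) =
      (pvSt (z ^^ (l.count '0' % 2 == 1)), pvSt (u ^^ (l.count '1' % 2 == 1))) := by
  induction l with
  | nil => intro z u; simp
  | cons h t ih =>
    intro z u
    by_cases h0 : h = '0'
    · subst h0
      simp only [List.foldl_cons, pvStep_zero, ih (!z) u, List.count_cons_self,
        List.count_cons, pvMod_succ]
      refine Prod.ext ?_ ?_ <;> (congr 1; cases z <;> cases u <;> simp [List.count_cons])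
    · by_cases h1 : h = '1'
      · subst h1
        simp only [List.foldl_cons, pvStep_one, ih z (!u), List.count_cons_self,
          List.count_cons, pvMod_succ]
        refine Prod.ext ?_ ?_ <;> (congr 1; cases z <;> cases u <;> simp [h0])
      · have hs : pvStepA (pvSt z, pvSt u) h = (pvSt z, pvSt u) := by
          simp [pvStepA, h0, h1]
        simp [List.foldl_cons, hs, ih z u, List.count_cons, h0, h1]


theorem pvFinal_eq (b1 b2 : Bool) : ((pvSt b1, pvSt b2) == ("q1", "q1")) = (b1 && b2) := by
  cases b1 <;> cases b2 <;> decide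

-- ===== VERDICT (by name: the statement is the Claim_ definition above) =====
theorem afd_impar_zeros_e_uns_spec : Claim_equal_afd_impar_zeros_e_uns := by
  intro entrada _
  unfold Spec_afd_impar_zeros_e_uns afd_impar_zeros_e_uns afd_impar_zeros_e_uns_alt
  have h := pvFold_parity entrada.toList false false
  simp only [Bool.false_xor] at h
  rw [show (("q0", "q0") : String × String) = (pvSt false, pvSt false) from rfl, h, pvFinal_eq]
  rw [PySem.Str.count_eq, PySem.Str.count_eq,
    show "0".toList = ['0'] from rfl, show "1".toList = ['1'] from rfl,
    pvCount_singleton, pvCount_singleton]
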